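-- pv_equiv track=rewrite | github.com/NegevUrbanResearch/ShelterBetShemesh | scripts/run_meguniot_backend.py | _greedy_select
-- ===== SOURCE A (Python) =====
-- def _greedy_select(
--     initial_uncovered: set[int],
--     candidate_coverages: dict[int, set[int]],
--     max_new_shelters: int | None,
-- ) -> tuple[list[int], list[set[int]], set[int], str]:
--     """Lazy-greedy maximum coverage (CELF-style) for uncovered buildings."""
--     uncovered = set(initial_uncovered)
--     selected: list[int] = []
--     selected_sets: list[set[int]] = []
--     if not uncovered:
--         return selected, selected_sets, uncovered, "all_covered_by_existing"
--     if max_new_shelters is not None and max_new_shelters <= 0: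
--         return selected, selected_sets, uncovered, "budget_limit"
--
--     # Max-heap via negative gain; third value tracks stale evaluations by round.
--     import heapq
--
--     heap: list[tuple[int, int, int]] = []
--     for idx, covered in candidate_coverages.items():
--         gain = len(covered & uncovered)
--         if gain > 0:
--             heapq.heappush(heap, (-gain, int(idx), -1))
--
--     current_round = 0
--     while uncovered and (max_new_shelters is None or len(selected) < max_new_shelters) and heap:
--         neg_gain, idx, eval_round = heapq.heappop(heap)
--         if eval_round != current_round:
--             refreshed_gain = len(candidate_coverages[idx] & uncovered)
--             if refreshed_gain > 0:
--                 heapq.heappush(heap, (-refreshed_gain, idx, current_round))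
--             continue
--
--         gain = -neg_gain
--         if gain <= 0:
--             break
--
--         covered_now = candidate_coverages[idx] & uncovered
--         if not covered_now:
--             continue
--
--         selected.append(idx)
--         selected_sets.append(set(covered_now))
--         uncovered -= covered_now
--         current_round += 1
--
--     if not uncovered:
--         stop_reason = "full_coverage_achieved"
--     elif max_new_shelters is not None and len(selected) >= max_new_shelters:
--         stop_reason = "budget_limit"
--     else:
--         stop_reason = "no_marginal_gain"
--
--     return selected, selected_sets, uncovered, stop_reason
-- ===== SOURCE B (Python) =====
-- def _greedy_select(
--     initial_uncovered,
--     candidate_coverages,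
--     max_new_shelters,
-- ):
--     """Plain (non-lazy) greedy maximum coverage: each round scans all candidates
--     and picks the one with the largest marginal gain, breaking ties by smallest index."""
--     uncovered = set(initial_uncovered)
--     selected = []
--     selected_sets = []
--     if not uncovered:
--         return selected, selected_sets, uncovered, "all_covered_by_existing"
--     if max_new_shelters is not None and max_new_shelters <= 0:
--         return selected, selected_sets, uncovered, "budget_limit"
--
--     while uncovered and (max_new_shelters is None or len(selected) < max_new_shelters):
--         best_idx = None
--         best_gain = 0
--         for idx, covered in candidate_coverages.items():
--             gain = len(covered & uncovered)
--             if gain > best_gain or (best_idx is not None and gain == best_gain and int(idx) < int(best_idx)):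
--                 best_gain = gain
--                 best_idx = idx
--         if best_idx is None:
--             break
--         covered_now = candidate_coverages[best_idx] & uncovered
--         selected.append(best_idx)
--         selected_sets.append(set(covered_now))
--         uncovered -= covered_now
--
--     if not uncovered:
--         stop_reason = "full_coverage_achieved"
--     elif max_new_shelters is not None and len(selected) >= max_new_shelters:
--         stop_reason = "budget_limit"
--     else:
--         stop_reason = "no_marginal_gain"
--
--     return selected, selected_sets, uncovered, stop_reason
-- ===== Notes on version B (the rewrite author's own statement) =====
-- stated objective: simpler
-- what changed: Replaced the CELF lazy-greedy (heap of cached gains with staleness rounds and re-evaluation) by the plain greedy maximum-coverage loop that rescans all candidates each round and picks the maximum fresh gain, breaking ties by smallest index exactly as the heap ordering does.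
import Mathlib
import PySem

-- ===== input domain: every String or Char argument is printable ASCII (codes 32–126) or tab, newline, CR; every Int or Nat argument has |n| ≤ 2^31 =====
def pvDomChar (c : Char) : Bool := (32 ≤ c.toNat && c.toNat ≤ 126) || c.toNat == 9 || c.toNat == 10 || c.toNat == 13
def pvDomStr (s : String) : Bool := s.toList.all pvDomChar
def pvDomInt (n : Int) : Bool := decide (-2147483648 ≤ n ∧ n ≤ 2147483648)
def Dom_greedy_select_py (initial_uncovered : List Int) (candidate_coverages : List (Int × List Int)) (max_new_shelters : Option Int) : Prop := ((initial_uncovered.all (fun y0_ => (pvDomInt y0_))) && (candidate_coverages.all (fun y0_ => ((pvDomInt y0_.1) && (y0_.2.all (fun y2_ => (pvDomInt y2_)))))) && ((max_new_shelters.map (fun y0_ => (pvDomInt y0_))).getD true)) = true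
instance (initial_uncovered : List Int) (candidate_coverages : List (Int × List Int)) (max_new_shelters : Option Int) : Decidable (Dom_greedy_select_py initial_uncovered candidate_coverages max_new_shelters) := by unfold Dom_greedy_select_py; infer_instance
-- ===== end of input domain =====

-- B replaces A's CELF lazy-greedy (heap of cached gains with staleness rounds) by the plain greedy
-- maximum-coverage loop that rescans all candidates each round (objective: simpler); same return value.

-- ===== PORT A =====
-- heapq on tuples: heappop returns the lexicographically smallest entry; all entries in A's heap are
-- distinct (one per candidate index), so modelling the heap as a lexicographically sorted list with
-- ordered insert (push) and head removal (pop) is value-exact.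
def pvEntLe (a b : Int × Int × Int) : Bool :=
  a.1 < b.1 || (a.1 == b.1 && (a.2.1 < b.2.1 || (a.2.1 == b.2.1 && a.2.2 ≤ b.2.2)))

def pvHeapPush (h : List (Int × Int × Int)) (x : Int × Int × Int) : List (Int × Int × Int) :=
  match h with
  | [] => [x]
  | y :: t => if pvEntLe x y then x :: y :: t else y :: pvHeapPush t x

-- number of heap entries whose eval_round is not the current round (termination measure only)
def pvStale (round : Int) (h : List (Int × Int × Int)) : Nat :=
  h.countP (fun e => e.2.2 != round)

theorem pvHeapPush_perm (h : List (Int × Int × Int)) (x : Int × Int × Int) :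
    (pvHeapPush h x).Perm (x :: h) := by
  induction h with
  | nil => simp [pvHeapPush]
  | cons y t ih =>
    simp only [pvHeapPush]
    split
    · exact List.Perm.refl _
    · exact (List.Perm.cons y ih).trans (List.Perm.swap x y t)

theorem pvStale_push (round : Int) (h : List (Int × Int × Int)) (x : Int × Int × Int) :
    pvStale round (pvHeapPush h x) = pvStale round (x :: h) := by
  unfold pvStale
  exact (pvHeapPush_perm h x).countP_eq _

-- the CELF while-loop of A (pop, refresh stale entries, select fresh maxima)
def pvALoop (d : PySem.Dict Int (List Int)) (mns : Option Int)
    (heap : List (Int × Int × Int)) (u : PySem.Set Int)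
    (sel : List Int) (sets : List (List Int)) (round : Int) :
    List Int × List (List Int) × List Int :=
  if u = [] then (sel, sets, u)
  else if (match mns with | none => true | some m => decide ((sel.length : Int) < m)) = false then
    (sel, sets, u)
  else match heap with
  | [] => (sel, sets, u)
  | (ng, idx, r) :: rest =>
    if r ≠ round then
      let rg := (PySem.Set.inter (PySem.Set.ofList (d.getD idx [])) u).length
      if rg > 0 then pvALoop d mns (pvHeapPush rest (-(rg : Int), idx, round)) u sel sets round
      else pvALoop d mns rest u sel sets round
    else
      let g := -ng
      if g ≤ 0 then (sel, sets, u)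
      else
        let covered_now := PySem.Set.inter (PySem.Set.ofList (d.getD idx [])) u
        if covered_now = [] then pvALoop d mns rest u sel sets round
        else pvALoop d mns rest (PySem.Set.diff u covered_now) (sel ++ [idx])
               (sets ++ [covered_now]) (round + 1)
termination_by (u.length, pvStale round heap, heap.length)
decreasing_by
  · apply Prod.Lex.right
    apply Prod.Lex.left
    rw [pvStale_push]
    unfold pvStale
    simp only [List.countP_cons]
    simp_all
  · apply Prod.Lex.right
    apply Prod.Lex.left
    unfold pvStale
    simp only [List.countP_cons]
    simp_all
  · have hst : pvStale round ((ng, idx, r) :: rest) = pvStale round rest := by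
      unfold pvStale; simp only [List.countP_cons]; simp_all
    rw [hst]
    exact Prod.Lex.right _ (Prod.Lex.right _ (by simp))
  · apply Prod.Lex.left
    rename_i hne
    have hx : ∃ y ∈ PySem.Set.inter (PySem.Set.ofList (d.getD idx [])) u, y ∈ u := by
      rcases List.exists_mem_of_ne_nil _ hne with ⟨y, hy⟩
      exact ⟨y, hy, ((PySem.Set.mem_inter _ _ _).mp hy).2⟩
    rcases hx with ⟨y, hyc, hyu⟩
    apply List.length_filter_lt_length_iff_exists.mpr
    exact ⟨y, hyu, by simp [hyc]⟩

def greedy_select_py (initial_uncovered : List Int) (candidate_coverages : List (Int × List Int)) (max_new_shelters : Option Int) : List Int × List (List Int) × List Int × String :=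
  let uncovered := PySem.Set.ofList initial_uncovered
  if uncovered = [] then ([], [], uncovered, "all_covered_by_existing")
  else if (match max_new_shelters with | none => false | some m => decide (m ≤ 0)) then
    ([], [], uncovered, "budget_limit")
  else
    let d := PySem.Dict.ofList candidate_coverages
    let heap := d.items.foldl (fun h p =>
      let gain := (PySem.Set.inter (PySem.Set.ofList p.2) uncovered).length
      if gain > 0 then pvHeapPush h (-(gain : Int), p.1, -1) else h) []
    match pvALoop d max_new_shelters heap uncovered [] [] 0 with
    | (sel, sets, u) =>
      let reason :=
        if u = [] then "full_coverage_achieved"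
        else match max_new_shelters with
          | some m => if m ≤ (sel.length : Int) then "budget_limit" else "no_marginal_gain"
          | none => "no_marginal_gain"
      (sel, sets, u, reason)

-- ===== PORT B =====
-- one full scan of candidate_coverages.items(): best candidate by (largest gain, smallest index)
def pvBestScan (u : PySem.Set Int) (items : List (Int × List Int)) : Option Int × Nat :=
  items.foldl (fun acc p =>
    let g := (PySem.Set.inter (PySem.Set.ofList p.2) u).length
    match acc with
    | (none, bg) => if g > bg then (some p.1, g) else (none, bg)
    | (some b, bg) => if g > bg ∨ (g = bg ∧ p.1 < b) then (some p.1, g) else (some b, bg))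
    (none, 0)

-- the plain-greedy while-loop of B (the dite guard only makes the recursion on u total; it always holds)
def pvBLoop (d : PySem.Dict Int (List Int)) (mns : Option Int)
    (u : PySem.Set Int) (sel : List Int) (sets : List (List Int)) :
    List Int × List (List Int) × List Int :=
  if u = [] then (sel, sets, u)
  else if (match mns with | none => true | some m => decide ((sel.length : Int) < m)) = false then
    (sel, sets, u)
  else match pvBestScan u d.items with
  | (none, _) => (sel, sets, u)
  | (some b, _) =>
    let covered_now := PySem.Set.inter (PySem.Set.ofList (d.getD b [])) u
    if _h : (PySem.Set.diff u covered_now).length < u.length then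
      pvBLoop d mns (PySem.Set.diff u covered_now) (sel ++ [b]) (sets ++ [covered_now])
    else (sel, sets, u)
termination_by u.length

def greedy_select_py_alt (initial_uncovered : List Int) (candidate_coverages : List (Int × List Int)) (max_new_shelters : Option Int) : List Int × List (List Int) × List Int × String :=
  let uncovered := PySem.Set.ofList initial_uncovered
  if uncovered = [] then ([], [], uncovered, "all_covered_by_existing")
  else if (match max_new_shelters with | none => false | some m => decide (m ≤ 0)) then
    ([], [], uncovered, "budget_limit")
  else
    let d := PySem.Dict.ofList candidate_coverages
    match pvBLoop d max_new_shelters uncovered [] [] with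
    | (sel, sets, u) =>
      let reason :=
        if u = [] then "full_coverage_achieved"
        else match max_new_shelters with
          | some m => if m ≤ (sel.length : Int) then "budget_limit" else "no_marginal_gain"
          | none => "no_marginal_gain"
      (sel, sets, u, reason)

-- ===== PRECONDITION & SPEC =====
def Spec_greedy_select_py (initial_uncovered : List Int) (candidate_coverages : List (Int × List Int)) (max_new_shelters : Option Int) (out : List Int × List (List Int) × List Int × String) : Prop := out = greedy_select_py_alt initial_uncovered candidate_coverages max_new_shelters
instance (initial_uncovered : List Int) (candidate_coverages : List (Int × List Int)) (max_new_shelters : Option Int) (out : List Int × List (List Int) × List Int × String) : Decidable (Spec_greedy_select_py initial_uncovered candidate_coverages max_new_shelters out) := by unfold Spec_greedy_select_py; infer_instance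

-- ===== CLAIM (what is proved, stated in full; the proofs are below) =====
def Claim_equal_greedy_select_py : Prop := ∀ (initial_uncovered : List Int) (candidate_coverages : List (Int × List Int)) (max_new_shelters : Option Int), Dom_greedy_select_py initial_uncovered candidate_coverages max_new_shelters → Spec_greedy_select_py initial_uncovered candidate_coverages max_new_shelters (greedy_select_py initial_uncovered candidate_coverages max_new_shelters)

-- ===== LEMMAS AND PROOFS =====

-- marginal gain of candidate i against uncovered set u
def pvGain (d : PySem.Dict Int (List Int)) (u : List Int) (i : Int) : Nat :=
  (PySem.Set.inter (PySem.Set.ofList (d.getD i [])) u).length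

def pvPairGain (u : List Int) (p : Int × List Int) : Nat :=
  (PySem.Set.inter (PySem.Set.ofList p.2) u).length

-- heap-state invariant of A's loop
def pvEntOk (d : PySem.Dict Int (List Int)) (u : List Int) (round : Int) (e : Int × Int × Int) : Prop :=
  e.1 < 0 ∧ e.2.1 ∈ d.keys ∧ e.2.2 ≤ round ∧
  (pvGain d u e.2.1 : Int) ≤ -e.1 ∧ (e.2.2 = round → (pvGain d u e.2.1 : Int) = -e.1)

def pvInv (d : PySem.Dict Int (List Int)) (u : List Int) (round : Int)
    (heap : List (Int × Int × Int)) : Prop :=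
  heap.Pairwise (fun a b => pvEntLe a b = true) ∧
  (∀ e ∈ heap, pvEntOk d u round e) ∧
  (heap.map (fun e => e.2.1)).Nodup ∧
  (∀ j ∈ d.keys, 0 < pvGain d u j → j ∈ heap.map (fun e => e.2.1))

theorem pvEntLe_total (a b : Int × Int × Int) : pvEntLe a b = true ∨ pvEntLe b a = true := by
  simp only [pvEntLe, Bool.or_eq_true, Bool.and_eq_true, decide_eq_true_eq, beq_iff_eq]
  omega

theorem pvEntLe_trans {a b c : Int × Int × Int}
    (h1 : pvEntLe a b = true) (h2 : pvEntLe b c = true) : pvEntLe a c = true := by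
  simp only [pvEntLe, Bool.or_eq_true, Bool.and_eq_true, decide_eq_true_eq, beq_iff_eq] at *
  omega

theorem pvHeapPush_pairwise {h : List (Int × Int × Int)} {x : Int × Int × Int}
    (hs : h.Pairwise (fun a b => pvEntLe a b = true)) :
    (pvHeapPush h x).Pairwise (fun a b => pvEntLe a b = true) := by
  induction h with
  | nil => simp [pvHeapPush]
  | cons y t ih =>
    rcases List.pairwise_cons.mp hs with ⟨hy, ht⟩
    simp only [pvHeapPush]
    split
    · rename_i hxy
      refine List.pairwise_cons.mpr ⟨?_, hs⟩
      intro z hz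
      rcases hz with _ | hz
      · exact hxy
      · exact pvEntLe_trans hxy (hy z (by assumption))
    · rename_i hxy
      have hyx : pvEntLe y x = true := by
        rcases pvEntLe_total x y with h' | h'
        · exact absurd h' hxy
        · exact h'
      refine List.pairwise_cons.mpr ⟨?_, ih ht⟩
      intro z hz
      have hm := (pvHeapPush_perm t x).mem_iff.mp hz
      rcases List.mem_cons.mp hm with h' | hzt
      · subst h'; exact hyx
      · exact hy z hzt

-- gain is antitone in the uncovered set
theorem pvGain_diff_le (d : PySem.Dict Int (List Int)) (u t : List Int) (i : Int) :
    pvGain d (PySem.Set.diff u t) i ≤ pvGain d u i := by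
  unfold pvGain
  simp only [PySem.Set.inter, PySem.Set.diff, ← List.countP_eq_length_filter]
  apply List.countP_mono_left
  intro x _ hx
  have h1 : x ∈ u.filter (fun y => !t.contains y) := by
    have := (PySem.Set.contains_iff _ x).mp hx
    simpa using this
  exact (PySem.Set.contains_iff _ x).mpr (List.mem_filter.mp h1).1

-- a selected candidate's gain drops to zero
theorem pvGain_diff_self (d : PySem.Dict Int (List Int)) (u : List Int) (i : Int) :
    pvGain d (PySem.Set.diff u (PySem.Set.inter (PySem.Set.ofList (d.getD i [])) u)) i = 0 := by
  unfold pvGain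
  have h : (PySem.Set.inter (PySem.Set.ofList (d.getD i []))
      (PySem.Set.diff u (PySem.Set.inter (PySem.Set.ofList (d.getD i [])) u))) = [] := by
    rw [List.eq_nil_iff_forall_not_mem]
    intro x hx
    have h1 := (PySem.Set.mem_inter _ _ _).mp hx
    have h2 := (PySem.Set.mem_diff _ _ _).mp h1.2
    exact h2.2 ((PySem.Set.mem_inter _ _ _).mpr ⟨h1.1, h2.1⟩)
  rw [h]
  simp

-- accumulator invariant of pvBestScan's fold
def pvScanOk (u : List Int) (l : List (Int × List Int)) (acc : Option Int × Nat) : Prop :=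
  match acc with
  | (none, bg) => bg = 0 ∧ ∀ p ∈ l, pvPairGain u p = 0
  | (some b, bg) => 0 < bg ∧ (∃ c, (b, c) ∈ l ∧ pvPairGain u (b, c) = bg) ∧
      ∀ p ∈ l, pvPairGain u p ≤ bg ∧ (pvPairGain u p = bg → b ≤ p.1)

theorem pvScan_step_ok (u : List Int) (l : List (Int × List Int)) (acc : Option Int × Nat)
    (p : Int × List Int) (h : pvScanOk u l acc) :
    pvScanOk u (l ++ [p]) ((fun (acc : Option Int × Nat) (p : Int × List Int) =>
      let g := (PySem.Set.inter (PySem.Set.ofList p.2) u).length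
      match acc with
      | (none, bg) => if g > bg then (some p.1, g) else (none, bg)
      | (some b, bg) => if g > bg ∨ (g = bg ∧ p.1 < b) then (some p.1, g) else (some b, bg)) acc p) := by
  rcases acc with ⟨ob, bg⟩
  rcases ob with _ | b
  · dsimp only
    rcases h with ⟨hbg, hall⟩
    by_cases hgt : (PySem.Set.inter (PySem.Set.ofList p.2) u).length > bg
    · rw [if_pos hgt]
      refine ⟨by omega, ⟨p.2, by simp, rfl⟩, ?_⟩
      intro q hq
      rcases List.mem_append.mp hq with hq | hq
      · have h1 := hall q hq
        simp only [pvPairGain] at h1 ⊢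
        constructor <;> omega
      · simp at hq; subst hq; exact ⟨le_refl _, fun _ => le_refl _⟩
    · rw [if_neg hgt]
      refine ⟨hbg, ?_⟩
      intro q hq
      rcases List.mem_append.mp hq with hq | hq
      · exact hall q hq
      · simp at hq; subst hq; simp only [pvPairGain]; omega
  · dsimp only
    rcases h with ⟨hbg, ⟨c, hc, hcg⟩, hall⟩
    simp only [pvPairGain] at hcg
    by_cases hgt : (PySem.Set.inter (PySem.Set.ofList p.2) u).length > bg ∨
        ((PySem.Set.inter (PySem.Set.ofList p.2) u).length = bg ∧ p.1 < b)
    · rw [if_pos hgt]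
      refine ⟨by omega, ⟨p.2, by simp, rfl⟩, ?_⟩
      intro q hq
      rcases List.mem_append.mp hq with hq | hq
      · have h1 := hall q hq
        simp only [pvPairGain] at h1 ⊢
        constructor
        · omega
        · intro he
          rcases hgt with hgt | ⟨hge, hlt⟩
          · omega
          · have : b ≤ q.1 := h1.2 (by omega)
            omega
      · simp at hq; subst hq; exact ⟨le_refl _, fun _ => le_refl _⟩
    · rw [if_neg hgt]
      push Not at hgt
      refine ⟨hbg, ⟨c, List.mem_append_left _ hc, by simpa [pvPairGain] using hcg⟩, ?_⟩
      intro q hq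
      rcases List.mem_append.mp hq with hq | hq
      · exact hall q hq
      · simp at hq; subst hq
        simp only [pvPairGain]
        constructor
        · omega
        · intro he; exact hgt.2 he

theorem pvScan_fold_ok (u : List Int) :
    ∀ (ps l : List (Int × List Int)) (acc : Option Int × Nat),
      pvScanOk u l acc →
      pvScanOk u (l ++ ps) (ps.foldl (fun acc p =>
        let g := (PySem.Set.inter (PySem.Set.ofList p.2) u).length
        match acc with
        | (none, bg) => if g > bg then (some p.1, g) else (none, bg)
        | (some b, bg) => if g > bg ∨ (g = bg ∧ p.1 < b) then (some p.1, g) else (some b, bg)) acc) := by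
  intro ps
  induction ps with
  | nil => intro l acc h; simpa using h
  | cons p t ih =>
    intro l acc h
    have h2 := pvScan_step_ok u l acc p h
    have h3 := ih (l ++ [p]) _ h2
    simpa [pvPairGain, List.append_assoc] using h3

theorem pvBestScan_ok (u : List Int) (items : List (Int × List Int)) :
    pvScanOk u items (pvBestScan u items) := by
  have h := pvScan_fold_ok u items [] (none, 0) (by exact ⟨rfl, by simp⟩)
  simpa [pvBestScan] using h

theorem pvBestScan_eq_some (u : List Int) (items : List (Int × List Int)) (b : Int) (g : Nat)
    (hg : 0 < g) (hmem : ∃ c, (b, c) ∈ items ∧ pvPairGain u (b, c) = g)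
    (hmax : ∀ p ∈ items, pvPairGain u p ≤ g ∧ (pvPairGain u p = g → b ≤ p.1)) :
    pvBestScan u items = (some b, g) := by
  have hok := pvBestScan_ok u items
  rcases hscan : pvBestScan u items with ⟨ob, bg⟩
  rw [hscan] at hok
  rcases ob with _ | b'
  · rcases hok with ⟨_, hall⟩
    rcases hmem with ⟨c, hc, hcg⟩
    have := hall _ hc
    omega
  · rcases hok with ⟨hbg, ⟨c', hc', hcg'⟩, hall'⟩
    rcases hmem with ⟨c, hc, hcg⟩
    have h1 : bg ≤ g := by have := (hmax _ hc').1; omega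
    have h2 : g ≤ bg := by have := (hall' _ hc).1; omega
    have hbgg : bg = g := le_antisymm h1 h2
    have h3 : b' ≤ b := (hall' _ hc).2 (by omega)
    have h4 : b ≤ b' := (hmax _ hc').2 (by omega)
    have : b = b' := le_antisymm h4 h3
    subst this
    rw [hbgg]

theorem pvPairGain_eq (d : PySem.Dict Int (List Int)) (hnd : d.keys.Nodup) (u : List Int) :
    ∀ p ∈ d.items, pvPairGain u p = pvGain d u p.1 := by
  intro p hp
  unfold pvPairGain pvGain
  rw [PySem.Dict.getD_of_mem_items d hp hnd []]

theorem pvKey_item (d : PySem.Dict Int (List Int)) (j : Int) (hj : j ∈ d.keys) :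
    (j, d.getD j []) ∈ d.items := by
  have hc : d.contains j = true := (PySem.Dict.contains_iff_mem_keys d j).mpr hj
  rw [PySem.Dict.contains_eq_isSome_get?] at hc
  rcases hgs : d.get? j with _ | c
  · rw [hgs] at hc; simp at hc
  · rw [PySem.Dict.getD_of_get?_eq_some d [] hgs]
    exact PySem.Dict.mem_items_of_get?_eq_some d hgs

theorem pvInv_refresh (d : PySem.Dict Int (List Int)) (u : List Int) (round ng idx r : Int)
    (rest : List (Int × Int × Int)) (hinv : pvInv d u round ((ng, idx, r) :: rest))
    (hrg : 0 < pvGain d u idx) :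
    pvInv d u round (pvHeapPush rest (-(pvGain d u idx : Int), idx, round)) := by
  rcases hinv with ⟨hsort, hent, hnodup, hcomp⟩
  have hperm := (pvHeapPush_perm rest (-(pvGain d u idx : Int), idx, round))
  have hpermm := hperm.map (fun e => e.2.1)
  refine ⟨pvHeapPush_pairwise (List.Pairwise.of_cons hsort), ?_, ?_, ?_⟩
  · intro e he
    rcases List.mem_cons.mp (hperm.mem_iff.mp he) with rfl | he'
    · exact ⟨by omega, (hent _ (List.mem_cons_self)).2.1, le_refl _, by simp, fun _ => by simp⟩
    · exact hent e (List.mem_cons_of_mem _ he')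
  · rw [hpermm.nodup_iff]
    simpa using hnodup
  · intro j hj hg
    have := hcomp j hj hg
    rw [hpermm.mem_iff]
    simpa using this

theorem pvInv_drop (d : PySem.Dict Int (List Int)) (u : List Int) (round ng idx r : Int)
    (rest : List (Int × Int × Int)) (hinv : pvInv d u round ((ng, idx, r) :: rest))
    (hg0 : pvGain d u idx = 0) :
    pvInv d u round rest := by
  rcases hinv with ⟨hsort, hent, hnodup, hcomp⟩
  refine ⟨List.Pairwise.of_cons hsort, fun e he => hent e (List.mem_cons_of_mem _ he),
    (List.nodup_cons.mp (by simpa using hnodup)).2, ?_⟩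
  intro j hj hg
  have := hcomp j hj hg
  simp only [List.map_cons, List.mem_cons] at this
  rcases this with rfl | h'
  · omega
  · exact h'

theorem pvInv_select (d : PySem.Dict Int (List Int)) (u : List Int) (round ng idx r : Int)
    (rest : List (Int × Int × Int)) (hinv : pvInv d u round ((ng, idx, r) :: rest)) :
    pvInv d (PySem.Set.diff u (PySem.Set.inter (PySem.Set.ofList (d.getD idx [])) u))
      (round + 1) rest := by
  rcases hinv with ⟨hsort, hent, hnodup, hcomp⟩
  set u' := PySem.Set.diff u (PySem.Set.inter (PySem.Set.ofList (d.getD idx [])) u) with hu'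
  refine ⟨List.Pairwise.of_cons hsort, ?_, (List.nodup_cons.mp (by simpa using hnodup)).2, ?_⟩
  · intro e he
    rcases hent e (List.mem_cons_of_mem _ he) with ⟨h1, h2, h3, h4, _⟩
    have hle : pvGain d u' e.2.1 ≤ pvGain d u e.2.1 := pvGain_diff_le d u _ e.2.1
    exact ⟨h1, h2, by omega, by omega, fun h => by omega⟩
  · intro j hj hg
    have hgu : 0 < pvGain d u j := lt_of_lt_of_le hg (pvGain_diff_le d u _ j)
    have := hcomp j hj hgu
    simp only [List.map_cons, List.mem_cons] at this
    rcases this with rfl | h'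
    · have hz := pvGain_diff_self d u j
      rw [← hu'] at hz
      omega
    · exact h'

theorem pvHead_best (d : PySem.Dict Int (List Int)) (u : List Int) (round ng idx r : Int)
    (rest : List (Int × Int × Int)) (hnd : d.keys.Nodup)
    (hinv : pvInv d u round ((ng, idx, r) :: rest)) (hr : r = round) :
    pvBestScan u d.items = (some idx, pvGain d u idx) := by
  rcases hinv with ⟨hsort, hent, hnodup, hcomp⟩
  have hhead := hent _ (List.mem_cons_self)
  rcases hhead with ⟨hng, hkey, _, _, hfresh⟩
  have hex : (pvGain d u idx : Int) = -ng := hfresh hr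
  have hpos : 0 < pvGain d u idx := by omega
  have hrel := (List.pairwise_cons.mp hsort).1
  apply pvBestScan_eq_some u d.items idx (pvGain d u idx) hpos
  · exact ⟨d.getD idx [], pvKey_item d idx hkey, by
      rw [pvPairGain_eq d hnd u _ (pvKey_item d idx hkey)]⟩
  · intro p hp
    rw [pvPairGain_eq d hnd u p hp]
    by_cases hpg : 0 < pvGain d u p.1
    · have hmem := hcomp p.1 (PySem.Dict.mem_keys_of_mem_items d hp) hpg
      simp only [List.map_cons, List.mem_cons] at hmem
      rcases hmem with heq | hmem
      · rw [heq]; exact ⟨le_refl _, fun _ => by omega⟩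
      · rcases List.mem_map.mp hmem with ⟨e, he, hek⟩
        have hle := hrel e he
        rcases hent e (List.mem_cons_of_mem _ he) with ⟨he1, _, _, he4, _⟩
        simp only [pvEntLe, Bool.or_eq_true, Bool.and_eq_true, decide_eq_true_eq,
          beq_iff_eq] at hle
        rw [← hek]
        constructor
        · omega
        · intro hgeq; omega
    · exact ⟨by omega, fun h => by omega⟩

-- the main loop equivalence
theorem pvLoop_eq : ∀ (d : PySem.Dict Int (List Int)) (mns : Option Int)
    (heap : List (Int × Int × Int)) (u : PySem.Set Int)
    (sel : List Int) (sets : List (List Int)) (round : Int),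
    d.keys.Nodup → pvInv d u round heap →
    pvALoop d mns heap u sel sets round = pvBLoop d mns u sel sets := by
  intro d mns heap u sel sets round
  induction heap, u, sel, sets, round using pvALoop.induct (d := d) (mns := mns)
  case case1 heap sel sets round =>
    intro _ _
    rw [pvALoop.eq_def, pvBLoop.eq_def]
    simp
  case case2 heap u sel sets round h1 h2 =>
    intro _ _
    rw [pvALoop.eq_def, pvBLoop.eq_def]
    simp [h1, h2]
  case case3 u sel sets round h1 h2 =>
    intro hnd hinv
    have hscan := pvBestScan_ok u d.items
    rcases hsc : pvBestScan u d.items with ⟨ob, bg⟩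
    rw [hsc] at hscan
    rcases ob with _ | b
    · rw [pvALoop.eq_def, pvBLoop.eq_def]
      simp [h1, h2, hsc]
    · exfalso
      rcases hscan with ⟨hbg, ⟨c, hc, hcg⟩, _⟩
      rw [pvPairGain_eq d hnd u _ hc] at hcg
      have hcomp := hinv.2.2.2 _ (PySem.Dict.mem_keys_of_mem_items d hc) (by omega)
      simp at hcomp
  case case4 u sel sets round h1 h2 ng idx r rest hne rg hrg ih =>
    intro hnd hinv
    have hrg' : 0 < (PySem.Set.inter (PySem.Set.ofList (d.getD idx [])) u).length := hrg
    rw [pvALoop.eq_def]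
    simp only [if_neg h1, if_neg h2]
    rw [if_pos hne]
    rw [if_pos hrg']
    exact ih hnd (pvInv_refresh d u round ng idx r rest hinv hrg')
  case case5 u sel sets round h1 h2 ng idx r rest hne rg hrg ih =>
    intro hnd hinv
    have hrg' : ¬ 0 < (PySem.Set.inter (PySem.Set.ofList (d.getD idx [])) u).length := hrg
    rw [pvALoop.eq_def]
    simp only [if_neg h1, if_neg h2]
    rw [if_pos hne]
    rw [if_neg hrg']
    have hg0 : pvGain d u idx = 0 := by
      unfold pvGain
      omega
    exact ih hnd (pvInv_drop d u round ng idx r rest hinv hg0)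
  case case6 u sel sets round h1 h2 ng idx r rest hnr g hg =>
    intro hnd hinv
    exfalso
    have hg' : -ng ≤ 0 := hg
    have hng := (hinv.2.1 _ List.mem_cons_self).1
    simp only at hng
    omega
  case case7 u sel sets round h1 h2 ng idx r rest hnr g hg cn hcn ih =>
    intro hnd hinv
    exfalso
    have hr : r = round := by omega
    have hcn' : (PySem.Set.inter (PySem.Set.ofList (d.getD idx [])) u) = [] := hcn
    have hfresh := (hinv.2.1 _ List.mem_cons_self).2.2.2.2 hr
    have hng := (hinv.2.1 _ List.mem_cons_self).1
    simp only at hfresh hng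
    have hz : pvGain d u idx = 0 := by
      unfold pvGain
      rw [hcn']
      simp
    omega
  case case8 u sel sets round h1 h2 ng idx r rest hnr g hg cn hcn ih =>
    intro hnd hinv
    have hr : r = round := by omega
    have hg' : ¬ -ng ≤ 0 := hg
    have hcn' : ¬ (PySem.Set.inter (PySem.Set.ofList (d.getD idx [])) u) = [] := hcn
    have hbest := pvHead_best d u round ng idx r rest hnd hinv hr
    have hlt : (PySem.Set.diff u (PySem.Set.inter (PySem.Set.ofList (d.getD idx [])) u)).length < u.length := by
      rcases List.exists_mem_of_ne_nil _ hcn' with ⟨y, hy⟩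
      have hyu : y ∈ u := ((PySem.Set.mem_inter _ _ _).mp hy).2
      apply List.length_filter_lt_length_iff_exists.mpr
      exact ⟨y, hyu, by simp [hy]⟩
    rw [pvALoop.eq_def]
    simp only [if_neg h1, if_neg h2]
    rw [if_neg hnr]
    rw [if_neg hg']
    rw [if_neg hcn']
    rw [pvBLoop.eq_def]
    simp only [if_neg h1, if_neg h2, hbest]
    rw [dif_pos hlt]
    exact ih hnd (pvInv_select d u round ng idx r rest hinv)

-- one step / one kept entry of A's heap-building loop
def pvBuildStep (u : List Int) (h : List (Int × Int × Int)) (p : Int × List Int) : List (Int × Int × Int) :=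
  let gain := (PySem.Set.inter (PySem.Set.ofList p.2) u).length
  if gain > 0 then pvHeapPush h (-(gain : Int), p.1, -1) else h

def pvPick (u : List Int) (p : Int × List Int) : Option (Int × Int × Int) :=
  let gain := (PySem.Set.inter (PySem.Set.ofList p.2) u).length
  if gain > 0 then some (-(gain : Int), p.1, -1) else none

theorem pvBuild_perm (u : List Int) :
    ∀ (l : List (Int × List Int)) (h0 : List (Int × Int × Int)),
      (l.foldl (pvBuildStep u) h0).Perm (h0 ++ l.filterMap (pvPick u)) := by
  intro l
  induction l with
  | nil => intro h0; simp
  | cons p t ih =>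
    intro h0
    simp only [List.foldl_cons, List.filterMap_cons]
    by_cases hg : (PySem.Set.inter (PySem.Set.ofList p.2) u).length > 0
    · have hstep : pvBuildStep u h0 p = pvHeapPush h0 (-(((PySem.Set.inter (PySem.Set.ofList p.2) u).length : Int)), p.1, -1) := by
        simp [pvBuildStep, hg]
      have hpick : pvPick u p = some (-(((PySem.Set.inter (PySem.Set.ofList p.2) u).length : Int)), p.1, -1) := by
        simp [pvPick, hg]
      rw [hstep, hpick]
      exact (ih _).trans (((pvHeapPush_perm h0 _).append_right _).trans List.perm_middle.symm)
    · have hstep : pvBuildStep u h0 p = h0 := by simp [pvBuildStep, hg]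
      have hpick : pvPick u p = none := by simp [pvPick, hg]
      rw [hstep, hpick]
      exact ih h0

theorem pvBuild_sorted (u : List Int) :
    ∀ (l : List (Int × List Int)) (h0 : List (Int × Int × Int)),
      h0.Pairwise (fun a b => pvEntLe a b = true) →
      (l.foldl (pvBuildStep u) h0).Pairwise (fun a b => pvEntLe a b = true) := by
  intro l
  induction l with
  | nil => intro h0 h; simpa using h
  | cons p t ih =>
    intro h0 h
    simp only [List.foldl_cons]
    apply ih
    by_cases hg : (PySem.Set.inter (PySem.Set.ofList p.2) u).length > 0
    · have hstep : pvBuildStep u h0 p = pvHeapPush h0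
          (-(((PySem.Set.inter (PySem.Set.ofList p.2) u).length : Int)), p.1, -1) := by
        simp [pvBuildStep, hg]
      rw [hstep]
      exact pvHeapPush_pairwise h
    · have hstep : pvBuildStep u h0 p = h0 := by simp [pvBuildStep, hg]
      rw [hstep]
      exact h

theorem pvPick_keys_sublist (u : List Int) :
    ∀ (l : List (Int × List Int)),
      ((l.filterMap (pvPick u)).map (fun e => e.2.1)).Sublist (l.map (fun p => p.1)) := by
  intro l
  induction l with
  | nil => simp
  | cons p t ih =>
    simp only [List.filterMap_cons, List.map_cons]
    cases hp : pvPick u p with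
    | none => exact ih.trans (List.sublist_cons_self _ _)
    | some e =>
      have : e.2.1 = p.1 := by
        unfold pvPick at hp
        dsimp only at hp
        split at hp
        · cases hp; rfl
        · cases hp
      simp only [List.map_cons, this]
      exact ih.cons₂ _

-- the initial heap built by A satisfies the invariant at round 0
theorem pvInitInv (d : PySem.Dict Int (List Int)) (u : List Int) (hnd : d.keys.Nodup) :
    pvInv d u 0 (d.items.foldl (fun h p =>
      let gain := (PySem.Set.inter (PySem.Set.ofList p.2) u).length
      if gain > 0 then pvHeapPush h (-(gain : Int), p.1, -1) else h) []) := by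
  have hfold : (d.items.foldl (fun h p =>
      let gain := (PySem.Set.inter (PySem.Set.ofList p.2) u).length
      if gain > 0 then pvHeapPush h (-(gain : Int), p.1, -1) else h) [])
      = d.items.foldl (pvBuildStep u) [] := rfl
  rw [hfold]
  have hperm := pvBuild_perm u d.items []
  simp only [List.nil_append] at hperm
  have hmem : ∀ e ∈ d.items.foldl (pvBuildStep u) [],
      ∃ p ∈ d.items, 0 < (PySem.Set.inter (PySem.Set.ofList p.2) u).length ∧
        e = (-(((PySem.Set.inter (PySem.Set.ofList p.2) u).length : Int)), p.1, -1) := by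
    intro e he
    have := hperm.mem_iff.mp he
    rcases List.mem_filterMap.mp this with ⟨p, hp, hpe⟩
    unfold pvPick at hpe
    dsimp only at hpe
    split at hpe
    · cases hpe; exact ⟨p, hp, by assumption, rfl⟩
    · cases hpe
  refine ⟨pvBuild_sorted u d.items [] (by simp), ?_, ?_, ?_⟩
  · intro e he
    rcases hmem e he with ⟨p, hp, hg, rfl⟩
    have hget : d.getD p.1 [] = p.2 := PySem.Dict.getD_of_mem_items d hp hnd []
    have hgain : pvGain d u p.1 = (PySem.Set.inter (PySem.Set.ofList p.2) u).length := by
      unfold pvGain; rw [hget]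
    refine ⟨by push_cast; omega, PySem.Dict.mem_keys_of_mem_items d hp, by norm_num, ?_, ?_⟩
    · simp [hgain]
    · intro h; norm_num at h
  · have := (hperm.map (fun e => e.2.1)).nodup_iff
    rw [this]
    exact (pvPick_keys_sublist u d.items).nodup hnd
  · intro j hj hgain
    have hc : d.contains j = true := (PySem.Dict.contains_iff_mem_keys d j).mpr hj
    rw [PySem.Dict.contains_eq_isSome_get?] at hc
    rcases hgs : d.get? j with _ | c
    · rw [hgs] at hc; simp at hc
    · have hmemit : (j, c) ∈ d.items := PySem.Dict.mem_items_of_get?_eq_some d hgs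
      have hget : d.getD j [] = c := PySem.Dict.getD_of_get?_eq_some d [] hgs
      have hglen : 0 < (PySem.Set.inter (PySem.Set.ofList c) u).length := by
        unfold pvGain at hgain; rw [hget] at hgain; exact hgain
      have : (-(((PySem.Set.inter (PySem.Set.ofList c) u).length : Int)), j, -1) ∈
          d.items.foldl (pvBuildStep u) [] := by
        apply hperm.mem_iff.mpr
        apply List.mem_filterMap.mpr
        exact ⟨(j, c), hmemit, by simp [pvPick, hglen]⟩
      exact List.mem_map.mpr ⟨_, this, rfl⟩

-- ===== VERDICT (by name: the statement is the Claim_ definition above) =====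
theorem greedy_select_py_spec : Claim_equal_greedy_select_py := by
  intro iu cc mns _
  unfold Spec_greedy_select_py greedy_select_py greedy_select_py_alt
  simp only
  refine if_congr Iff.rfl rfl (if_congr Iff.rfl rfl ?_)
  rw [pvLoop_eq _ mns _ _ [] [] 0 (PySem.Dict.nodup_keys_ofList cc)
    (pvInitInv _ _ (PySem.Dict.nodup_keys_ofList cc))]
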